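-- pv_equiv track=rewrite | github.com/Project-HeSO/hzlc_make_lc | pca.py | group_stars_based_on_obs_history
-- ===== SOURCE A (Python) =====
-- def group_stars_based_on_obs_history(source_ids_all,list_frame_history_of_star):
--     ''' Group stars based on their frame ID histories
--
--     Args:
--         source_ids_all :
--         list_frame_history_of_star :
--
--     Returns:
--         dict_of_obs_history : dictionary of the star IDs. The keys are the frame ID histories
--
--     '''
--     dict_of_obs_history = {}
--
--     for i, source_id in enumerate(source_ids_all):
--         fitsids = list_frame_history_of_star[i]
--
--         fits_history = ''
--         for dmy in fitsids:
--             fits_history += 'TMQ' + dmy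
--
--         if not fits_history in dict_of_obs_history:
--             dict_of_obs_history[fits_history] = []
--
--         dict_of_obs_history[fits_history].append(source_id)
--
--     return dict_of_obs_history
-- ===== SOURCE B (Python) =====
-- def group_stars_based_on_obs_history(source_ids_all, list_frame_history_of_star):
--     # Same grouping computed by a different decomposition: precompute every star's
--     # key, list the distinct keys in first-occurrence order, then build each
--     # group by one filter scan over the (key, id) pairs.
--     keys = [''.join('TMQ' + dmy for dmy in fitsids)
--             for fitsids in list_frame_history_of_star[:len(source_ids_all)]]
--     return {k: [sid for kk, sid in zip(keys, source_ids_all) if kk == k]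
--             for k in dict.fromkeys(keys)}
-- ===== Notes on version B (the rewrite author's own statement) =====
-- stated objective: alternative
-- what changed: Replaces the incremental dict-append grouping loop with a different decomposition: precompute every star's key once, take the distinct keys in first-occurrence order via dict.fromkeys, and build each group by a filter scan over the (key, id) pairs.
import Mathlib
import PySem

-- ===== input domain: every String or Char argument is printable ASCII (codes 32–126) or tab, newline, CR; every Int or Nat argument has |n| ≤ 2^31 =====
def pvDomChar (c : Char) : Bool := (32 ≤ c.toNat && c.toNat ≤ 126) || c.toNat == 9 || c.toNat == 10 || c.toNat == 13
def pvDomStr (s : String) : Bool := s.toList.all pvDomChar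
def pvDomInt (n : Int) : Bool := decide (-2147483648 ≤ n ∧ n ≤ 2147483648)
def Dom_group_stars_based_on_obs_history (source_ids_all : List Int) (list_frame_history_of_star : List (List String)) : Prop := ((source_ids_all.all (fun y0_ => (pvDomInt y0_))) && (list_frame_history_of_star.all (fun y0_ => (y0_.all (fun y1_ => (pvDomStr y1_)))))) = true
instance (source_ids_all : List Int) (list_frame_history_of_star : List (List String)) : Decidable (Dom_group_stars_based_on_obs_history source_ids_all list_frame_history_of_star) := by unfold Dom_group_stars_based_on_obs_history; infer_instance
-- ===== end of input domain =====

-- ===== PORT A =====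
-- B groups by one filter scan per distinct key over a precomputed key list instead of incremental dict-append (alternative decomposition, same results).
def group_stars_based_on_obs_history (source_ids_all : List Int) (list_frame_history_of_star : List (List String)) : List (String × List Int) :=
  ((PySem.List.enumerate source_ids_all).foldl
    (fun dict p =>
      -- fitsids = list_frame_history_of_star[i]; IndexError (index out of range) is excluded by Pre_, so pyGetD's default is never read
      let fitsids := PySem.List.pyGetD list_frame_history_of_star p.1 []
      let fits_history := fitsids.foldl (fun acc dmy => acc ++ ("TMQ" ++ dmy)) ""
      let dict' := if dict.contains fits_history then dict else dict.insert fits_history ([] : List Int)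
      dict'.modify fits_history [] (fun v => v ++ [p.2]))
    PySem.Dict.empty).items

-- ===== PORT B =====
def group_stars_based_on_obs_history_alt (source_ids_all : List Int) (list_frame_history_of_star : List (List String)) : List (String × List Int) :=
  let keys := (PySem.List.slice list_frame_history_of_star none (some (source_ids_all.length : Int))).map
      (fun fitsids => PySem.Str.join "" (fitsids.map (fun dmy => "TMQ" ++ dmy)))
  (PySem.List.dedup keys).map
    (fun k => (k, ((keys.zip source_ids_all).filter (fun p => p.1 == k)).map (fun p => p.2)))

-- ===== PRECONDITION & SPEC =====
-- Pre_ excludes exactly the inputs where A raises IndexError: fewer frame histories than source ids.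
def Pre_group_stars_based_on_obs_history (source_ids_all : List Int) (list_frame_history_of_star : List (List String)) : Prop :=
  source_ids_all.length ≤ list_frame_history_of_star.length
instance (source_ids_all : List Int) (list_frame_history_of_star : List (List String)) : Decidable (Pre_group_stars_based_on_obs_history source_ids_all list_frame_history_of_star) := by unfold Pre_group_stars_based_on_obs_history; infer_instance
def pvWitness_group_stars_based_on_obs_history : List Int × List (List String) := ([1, 2, 3], [["a"], [], ["a"]])
def Spec_group_stars_based_on_obs_history (source_ids_all : List Int) (list_frame_history_of_star : List (List String)) (out : List (String × List Int)) : Prop := out = group_stars_based_on_obs_history_alt source_ids_all list_frame_history_of_star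
instance (source_ids_all : List Int) (list_frame_history_of_star : List (List String)) (out : List (String × List Int)) : Decidable (Spec_group_stars_based_on_obs_history source_ids_all list_frame_history_of_star out) := by unfold Spec_group_stars_based_on_obs_history; infer_instance

-- ===== CLAIM (what is proved, stated in full; the proofs are below) =====
def Claim_equal_group_stars_based_on_obs_history : Prop := ∀ (source_ids_all : List Int) (list_frame_history_of_star : List (List String)), Dom_group_stars_based_on_obs_history source_ids_all list_frame_history_of_star → Pre_group_stars_based_on_obs_history source_ids_all list_frame_history_of_star → Spec_group_stars_based_on_obs_history source_ids_all list_frame_history_of_star (group_stars_based_on_obs_history source_ids_all list_frame_history_of_star)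

-- ===== LEMMAS AND PROOFS =====

-- A's per-star key computation, named for the proofs
def pvKeyOf (fitsids : List String) : String :=
  fitsids.foldl (fun acc dmy => acc ++ ("TMQ" ++ dmy)) ""

-- A's loop body, named for the proofs
def pvStep (dict : PySem.Dict String (List Int)) (q : String × Int) : PySem.Dict String (List Int) :=
  (if dict.contains q.1 then dict else dict.insert q.1 ([] : List Int)).modify q.1 [] (fun v => v ++ [q.2])

theorem pv_intersperse_nil_flatten (L : List (List Char)) : (List.intersperse [] L).flatten = L.flatten := by
  induction L with
  | nil => simp
  | cons p rest ih =>
    cases rest with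
    | nil => simp
    | cons q r => simp_all [List.intersperse]

theorem pv_chars_join_empty (L : List (List Char)) : PySem.Chars.join [] L = L.flatten := by
  simp [PySem.Chars.join, List.intercalate, pv_intersperse_nil_flatten]

theorem pv_foldl_append_toList (l : List String) (a : String) :
    (l.foldl (fun x y => x ++ y) a).toList = a.toList ++ (l.map String.toList).flatten := by
  induction l generalizing a with
  | nil => simp
  | cons x xs ih => simp [List.foldl_cons, ih]

theorem pv_join_empty_foldl (l : List String) : PySem.Str.join "" l = l.foldl (fun a b => a ++ b) "" := by
  apply String.toList_inj.mp
  simp [PySem.Str.join, pv_chars_join_empty, pv_foldl_append_toList]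

theorem pvKeyOf_eq (fitsids : List String) :
    PySem.Str.join "" (fitsids.map (fun dmy => "TMQ" ++ dmy)) = pvKeyOf fitsids := by
  rw [pv_join_empty_foldl, pvKeyOf, List.foldl_map]

theorem pvStep_getD (d : PySem.Dict String (List Int)) (q : String × Int) (k : String) :
    (pvStep d q).getD k [] = if k = q.1 then d.getD q.1 [] ++ [q.2] else d.getD k [] := by
  unfold pvStep
  by_cases hc : d.contains q.1
  · simp [hc, PySem.Dict.getD_modify]
  · simp only [Bool.not_eq_true] at hc
    rw [if_neg (by simp [hc]), PySem.Dict.getD_modify]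
    split_ifs with h
    · rw [PySem.Dict.getD_insert_self, PySem.Dict.getD_of_not_contains d ([] : List Int) hc]
    · exact PySem.Dict.getD_insert_of_ne d _ _ h

theorem pvStep_keys (d : PySem.Dict String (List Int)) (q : String × Int) :
    (pvStep d q).keys = PySem.Set.add d.keys q.1 := by
  unfold pvStep
  by_cases hc : d.contains q.1
  · rw [if_pos hc, PySem.Dict.keys_modify, PySem.Dict.keys_insert_of_contains d _ hc]
    have : q.1 ∈ d.keys := (PySem.Dict.contains_iff_mem_keys d q.1).mp hc
    simp [PySem.Set.add, this]
  · simp only [Bool.not_eq_true] at hc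
    rw [if_neg (by simp [hc]), PySem.Dict.keys_modify]
    rw [PySem.Dict.keys_insert_of_contains _ _ (PySem.Dict.contains_insert_self d q.1 ([] : List Int))]
    rw [PySem.Dict.keys_insert_of_not_contains d _ hc]
    have : q.1 ∉ d.keys := fun h => by simp [(PySem.Dict.contains_iff_mem_keys d q.1).mpr h] at hc
    simp [PySem.Set.add, this]

theorem pv_foldl_pvStep_getD (l : List (String × Int)) (d : PySem.Dict String (List Int)) (k : String) :
    (l.foldl pvStep d).getD k [] = d.getD k [] ++ (l.filter (fun q => q.1 == k)).map (fun q => q.2) := by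
  induction l generalizing d with
  | nil => simp
  | cons q rest ih =>
    simp only [List.foldl_cons, ih, pvStep_getD, List.filter_cons]
    by_cases h : k = q.1
    · simp [h]
    · have h' : ¬ q.1 = k := fun hh => h hh.symm
      simp [h, h']

theorem pv_foldl_pvStep_keys (l : List (String × Int)) (d : PySem.Dict String (List Int)) :
    (l.foldl pvStep d).keys = PySem.Set.update d.keys (l.map (fun q => q.1)) := by
  induction l generalizing d with
  | nil => simp [PySem.Set.update]
  | cons q rest ih =>
    simp only [List.foldl_cons, ih, pvStep_keys, List.map_cons]
    rfl

theorem pvEnumFold {b : Type} (hist : List (List String)) (g : b → String × Int → b) :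
    ∀ (ids : List Int) (n : Nat) (d : b), n + ids.length ≤ hist.length →
    (PySem.List.enumerate ids (n : Int)).foldl
        (fun acc p => g acc (pvKeyOf (PySem.List.pyGetD hist p.1 []), p.2)) d
      = ((((hist.drop n).take ids.length).map pvKeyOf).zip ids).foldl g d := by
  intro ids
  induction ids with
  | nil => intro n d _; simp [PySem.List.enumerate]
  | cons x xs ih =>
    intro n d h
    simp only [List.length_cons] at h
    have hn : n < hist.length := by omega
    rw [PySem.List.enumerate_cons, List.foldl_cons]
    have hcast : ((n : Int) + 1) = ((n + 1 : Nat) : Int) := by push_cast; ring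
    rw [hcast, ih (n + 1) _ (by omega)]
    rw [List.drop_eq_getElem_cons hn]
    have heq : PySem.List.pyGetD hist ((n : Nat) : Int) [] = hist[n] := by
      rw [PySem.List.pyGetD_natCast]; exact List.getD_eq_getElem hist [] hn
    simp only [List.length_cons, List.take_succ_cons, List.map_cons, List.zip_cons_cons,
      List.foldl_cons, heq]

-- ===== VERDICT (by name: the statement is the Claim_ definition above) =====
theorem group_stars_based_on_obs_history_spec : Claim_equal_group_stars_based_on_obs_history := by
  intro ids hist _ hpre
  unfold Pre_group_stars_based_on_obs_history at hpre
  unfold Spec_group_stars_based_on_obs_history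
  have hA : group_stars_based_on_obs_history ids hist
      = ((PySem.List.enumerate ids ((0 : Nat) : Int)).foldl
          (fun acc p => pvStep acc (pvKeyOf (PySem.List.pyGetD hist p.1 []), p.2))
          PySem.Dict.empty).items := rfl
  rw [hA, pvEnumFold hist pvStep ids 0 PySem.Dict.empty (by omega), List.drop_zero]
  unfold group_stars_based_on_obs_history_alt
  rw [PySem.List.slice_to hist (by positivity), Int.toNat_natCast]
  simp only [pvKeyOf_eq]
  set K := (hist.take ids.length).map pvKeyOf with hK
  have hKlen : K.length = ids.length := by
    simp [hK, List.length_take, Nat.min_eq_left hpre]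
  have hfst : (K.zip ids).map (fun q => q.1) = K := by
    simpa using List.map_fst_zip (l₁ := K) (l₂ := ids) (le_of_eq hKlen)
  have hkeys : PySem.Set.update (PySem.Dict.empty : PySem.Dict String (List Int)).keys K
      = PySem.List.dedup K := by
    rw [PySem.List.dedup_eq_ofList]; rfl
  have hnodup : ((K.zip ids).foldl pvStep PySem.Dict.empty).keys.Nodup := by
    rw [pv_foldl_pvStep_keys, hfst, hkeys, PySem.List.dedup_eq_ofList]
    exact PySem.Set.nodup_ofList K
  rw [PySem.Dict.items_eq_map_keys _ hnodup ([] : List Int), pv_foldl_pvStep_keys, hfst, hkeys]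
  apply List.map_congr_left
  intro k _
  rw [pv_foldl_pvStep_getD, PySem.Dict.getD_empty, List.nil_append]
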